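-- pv_equiv track=rewrite | github.com/Salome2010/IntroProgramacion | recu.py | ap_antes_corte
-- ===== SOURCE A (Python) =====
-- def ap_antes_corte(c:str, s:str) -> int:
--     total:int = 0
--     for i in range(len(s)):
--         if s[i] == c:
--             total+=1
--         if s[i] == "x":
--             return total
--     return total
-- ===== SOURCE B (Python) =====
-- def ap_antes_corte(c: str, s: str) -> int:
--     i = s.find("x")
--     prefix = s if i == -1 else s[:i + 1]
--     return sum(ch == c for ch in prefix)
-- ===== Notes on version B (the rewrite author's own statement) =====
-- stated objective: faster
-- what changed: Replaced the index loop with its early return by locating the first 'x' with str.find, slicing the prefix up to and including it, and summing per-character equality over that prefix.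
import Mathlib
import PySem

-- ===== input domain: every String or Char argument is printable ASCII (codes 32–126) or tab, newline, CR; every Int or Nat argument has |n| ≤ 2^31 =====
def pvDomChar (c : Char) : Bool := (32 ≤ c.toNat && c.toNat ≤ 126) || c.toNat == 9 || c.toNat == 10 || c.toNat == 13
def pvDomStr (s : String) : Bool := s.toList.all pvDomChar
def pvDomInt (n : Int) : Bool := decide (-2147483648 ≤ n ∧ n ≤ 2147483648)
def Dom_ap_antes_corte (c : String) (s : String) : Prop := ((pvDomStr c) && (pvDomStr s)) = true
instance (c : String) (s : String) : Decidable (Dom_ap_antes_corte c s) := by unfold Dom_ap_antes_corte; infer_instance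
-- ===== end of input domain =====

-- B replaces A's early-return index loop by find-the-first-'x', slice the pref, sum equalities (objective: alternative).

-- ===== PORT A =====
-- A's for-loop over indices with accumulator `total` and an early return at 'x':
-- structural recursion over the remaining characters carrying `total`.
def apLoop (c : String) (chars : List Char) (total : Int) : Int :=
  match chars with
  | [] => total
  | ch :: rest =>
      let total' : Int := if String.singleton ch = c then total + 1 else total
      if ch = 'x' then total' else apLoop c rest total'

def ap_antes_corte (c : String) (s : String) : Int :=
  apLoop c s.toList 0

-- ===== PORT B =====
-- B: i = s.find("x"); pref = s if i == -1 else s[:i+1]; sum(ch == c for ch in pref).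
def ap_antes_corte_alt (c : String) (s : String) : Int :=
  let i : Int := PySem.Str.find s "x"
  let pref : List Char :=
    if i = -1 then s.toList else PySem.List.slice s.toList none (some (i + 1))
  pref.foldl (fun acc ch => acc + (if String.singleton ch = c then 1 else 0)) 0

-- ===== PRECONDITION & SPEC =====
def Spec_ap_antes_corte (c : String) (s : String) (out : Int) : Prop := out = ap_antes_corte_alt c s
instance (c : String) (s : String) (out : Int) : Decidable (Spec_ap_antes_corte c s out) := by unfold Spec_ap_antes_corte; infer_instance

-- ===== CLAIM (what is proved, stated in full; the proofs are below) =====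
def Claim_equal_ap_antes_corte : Prop := ∀ (c : String) (s : String), Dom_ap_antes_corte c s → Spec_ap_antes_corte c s (ap_antes_corte c s)

-- ===== LEMMAS AND PROOFS =====

-- cutX cs = the pref of cs up to and including the first 'x' (all of cs if there is none)
def cutX : List Char → List Char
  | [] => []
  | ch :: rest => if ch = 'x' then [ch] else ch :: cutX rest

lemma foldl_ind_add (c : String) (l : List Char) (t : Int) :
    l.foldl (fun acc ch => acc + (if String.singleton ch = c then 1 else 0)) t
      = t + l.foldl (fun acc ch => acc + (if String.singleton ch = c then 1 else 0)) 0 := by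
  induction l generalizing t with
  | nil => simp
  | cons ch rest ih =>
      simp only [List.foldl_cons]
      rw [ih, ih (0 + _)]
      ring

lemma apLoop_eq_fold_cutX (c : String) (cs : List Char) (t : Int) :
    apLoop c cs t
      = t + (cutX cs).foldl (fun acc ch => acc + (if String.singleton ch = c then 1 else 0)) 0 := by
  induction cs generalizing t with
  | nil => simp [apLoop, cutX]
  | cons ch rest ih =>
      simp only [apLoop, cutX]
      by_cases hx : ch = 'x'
      · simp only [hx, if_pos rfl]
        by_cases hc : String.singleton 'x' = c <;> simp [hc]
      · simp only [if_neg hx, List.foldl_cons]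
        rw [ih, foldl_ind_add c (cutX rest) (0 + _)]
        by_cases hc : String.singleton ch = c <;> simp [hc] <;> ring

lemma cutX_of_not_mem (cs : List Char) (h : 'x' ∉ cs) : cutX cs = cs := by
  induction cs with
  | nil => rfl
  | cons ch rest ih =>
      simp only [List.mem_cons, not_or] at h
      simp [cutX, Ne.symm h.1, ih h.2]

lemma singleton_prefix_iff (l : List Char) : ['x'] <+: l ↔ l[0]? = some 'x' := by
  cases l with
  | nil => simp
  | cons a t =>
      constructor
      · rintro ⟨u, hu⟩
        simp only [List.cons_append, List.nil_append] at hu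
        cases hu
        simp
      · intro h
        simp only [List.getElem?_cons_zero, Option.some.injEq] at h
        exact ⟨t, by simp [h]⟩

lemma cutX_of_first (cs : List Char) (k : Nat)
    (h1 : cs[k]? = some 'x') (h2 : ∀ i < k, cs[i]? ≠ some 'x') :
    cutX cs = cs.take (k + 1) := by
  induction cs generalizing k with
  | nil => simp at h1
  | cons ch rest ih =>
      cases k with
      | zero =>
          simp only [List.getElem?_cons_zero, Option.some.injEq] at h1
          simp [cutX, h1]
      | succ k =>
          have hch : ch ≠ 'x' := by
            intro hc
            exact h2 0 (Nat.succ_pos k) (by simp [hc])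
          simp only [List.getElem?_cons_succ] at h1
          have h2' : ∀ i < k, rest[i]? ≠ some 'x' := by
            intro i hi
            have := h2 (i + 1) (by omega)
            simpa using this
          simp [cutX, hch, ih k h1 h2']

-- ===== VERDICT (by name: the statement is the Claim_ definition above) =====
theorem ap_antes_corte_spec : Claim_equal_ap_antes_corte := by
  intro c s _
  unfold Spec_ap_antes_corte ap_antes_corte ap_antes_corte_alt
  simp only [PySem.Str.find_eq]
  have hx : ("x" : String).toList = ['x'] := by decide
  rw [hx]
  set cs := s.toList with hcs
  by_cases hfind : PySem.Chars.find cs ['x'] = -1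
  · have hninf : ¬ (['x'] <:+: cs) := (PySem.Chars.find_eq_neg_one_iff cs ['x']).mp hfind
    have hmem : 'x' ∉ cs := by
      intro hm
      obtain ⟨u, v, huv⟩ := List.append_of_mem hm
      exact hninf ⟨u, v, by simp [huv]⟩
    rw [apLoop_eq_fold_cutX, cutX_of_not_mem cs hmem]
    simp [hfind]
  · have hnn : 0 ≤ PySem.Chars.find cs ['x'] := by
      have := PySem.Chars.neg_one_le_find cs ['x']
      omega
    obtain ⟨hpre, hmin⟩ := PySem.Chars.find_spec hnn
    set k : Nat := (PySem.Chars.find cs ['x']).toNat with hk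
    have h1 : cs[k]? = some 'x' := by
      have := (singleton_prefix_iff (cs.drop k)).mp hpre
      simpa [List.getElem?_drop] using this
    have h2 : ∀ i < k, cs[i]? ≠ some 'x' := by
      intro i hi hget
      exact hmin i hi ((singleton_prefix_iff (cs.drop i)).mpr (by simpa [List.getElem?_drop] using hget))
    have hslice : PySem.List.slice cs none (some (PySem.Chars.find cs ['x'] + 1)) = cs.take (k + 1) := by
      rw [PySem.List.slice_to cs (by omega)]
      congr 1
      omega
    rw [apLoop_eq_fold_cutX, cutX_of_first cs k h1 h2]
    simp [hfind, hslice]
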